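-- pv_equiv track=rewrite | github.com/carlos-macia/Generacion-usuarios-workspace-en-Bloque | genera.py | extraerPrimeraSilaba
-- ===== SOURCE A (Python) =====
-- def extraerPrimeraSilaba(cadena):
--     """
--     Extrae la primera (sílaba) de una cadena
--     """
--     i = 0
--     vocales = 0
--     new = ""
--     while i < len(cadena):
--         if cadena[i] in ['a','e','i','o','u']:
--             vocales += 1
--             if i > 0:
--                 if cadena[i-1] == 'q' and cadena[i] == 'u':
--                     vocales -= 1
--                 if cadena[i-1] == 'g' and cadena[i] == 'u':
--                     vocales -= 1
--         if vocales < 2: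
--             new += cadena[i]
--         else:
--             break
--         i += 1
--     return(new)
-- ===== SOURCE B (Python) =====
-- def extraerPrimeraSilaba(cadena):
--     """
--     Extrae la primera (sílaba) de una cadena
--     """
--     def counted(i):
--         c = cadena[i]
--         return c in 'aeiou' and not (c == 'u' and i > 0 and cadena[i - 1] in ('q', 'g'))
--     idxs = [i for i in range(len(cadena)) if counted(i)]
--     return cadena[:idxs[1]] if len(idxs) > 1 else cadena
-- ===== Notes on version B (the rewrite author's own statement) =====
-- stated objective: alternative
-- what changed: B replaces A's single scan with a mutable vowel counter, early break and incremental string building by a two-phase approach: collect the positions of counted vowels (excluding u after q/g) with a comprehension, then return the slice up to the second such position (or the whole string).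
import Mathlib
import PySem

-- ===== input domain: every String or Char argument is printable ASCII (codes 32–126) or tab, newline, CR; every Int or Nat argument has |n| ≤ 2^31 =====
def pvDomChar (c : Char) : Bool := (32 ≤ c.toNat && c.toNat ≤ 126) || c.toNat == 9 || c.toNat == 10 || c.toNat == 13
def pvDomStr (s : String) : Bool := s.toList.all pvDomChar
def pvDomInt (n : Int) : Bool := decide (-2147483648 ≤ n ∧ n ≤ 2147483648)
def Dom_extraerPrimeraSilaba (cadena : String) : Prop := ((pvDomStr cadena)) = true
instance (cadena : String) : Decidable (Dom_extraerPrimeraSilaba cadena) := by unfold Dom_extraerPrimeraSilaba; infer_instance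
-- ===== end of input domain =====

-- B replaces A's single counting scan (mutable vowel counter, early break, incremental string
-- building) by a two-phase plan: collect the positions of counted vowels, then slice before the
-- second one; same O(n) cost (objective: alternative).

-- ===== PORT A =====
-- Literal port of A's while loop: index i, running Int counter `vocales`, accumulator `new`.
def loopA (l : List Char) (i : Nat) (vocales : Int) (new : List Char) : List Char :=
  if h : i < l.length then
    let c := l[i]
    let vocales :=
      if c ∈ (['a','e','i','o','u'] : List Char) then
        let v := vocales + 1
        if 0 < i then
          -- cadena[i-1] with 1 ≤ i < len is plain in-range indexing, so getD is exact here
          let v := if l.getD (i-1) ' ' == 'q' && c == 'u' then v - 1 else v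
          let v := if l.getD (i-1) ' ' == 'g' && c == 'u' then v - 1 else v
          v
        else v
      else vocales
    if vocales < 2 then loopA l (i+1) vocales (new ++ [c]) else new
  else new
termination_by l.length - i

def extraerPrimeraSilaba (cadena : String) : String :=
  String.ofList (loopA cadena.toList 0 0 [])

-- ===== PORT B =====
-- counted(i) of Source B: cadena[i] is a vowel not preceded (as a 'u') by q/g; indices in range
def countedB (l : List Char) (i : Nat) : Bool :=
  let c := l.getD i ' '
  (c ∈ (['a','e','i','o','u'] : List Char)) &&
    !(c == 'u' && decide (0 < i) && (l.getD (i-1) ' ' ∈ (['q','g'] : List Char)))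

def extraerPrimeraSilaba_alt (cadena : String) : String :=
  let l := cadena.toList
  let idxs := (List.range l.length).filter (countedB l)
  -- cadena[:idxs[1]] with 0 ≤ idxs[1] < len is exactly take idxs[1]
  if h : 1 < idxs.length then String.ofList (l.take idxs[1]) else cadena

-- ===== PRECONDITION & SPEC =====
def Spec_extraerPrimeraSilaba (cadena : String) (out : String) : Prop := out = extraerPrimeraSilaba_alt cadena
instance (cadena : String) (out : String) : Decidable (Spec_extraerPrimeraSilaba cadena out) := by unfold Spec_extraerPrimeraSilaba; infer_instance

-- ===== CLAIM (what is proved, stated in full; the proofs are below) =====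
def Claim_equal_extraerPrimeraSilaba : Prop := ∀ (cadena : String), Dom_extraerPrimeraSilaba cadena → Spec_extraerPrimeraSilaba cadena (extraerPrimeraSilaba cadena)

-- ===== LEMMAS AND PROOFS =====

-- number of counted vowels among the first i characters
def cntB (l : List Char) (i : Nat) : Nat := ((List.range i).filter (countedB l)).length

-- the index where A's loop stops appending: the second counted vowel, else the length
def stopIdx (l : List Char) : Nat :=
  if h : 1 < ((List.range l.length).filter (countedB l)).length then
    ((List.range l.length).filter (countedB l))[1]
  else l.length

lemma cnt_succ (l : List Char) (i : Nat) :
    cntB l (i+1) = cntB l i + (if countedB l i then 1 else 0) := by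
  unfold cntB
  rw [List.range_succ, List.filter_append]
  by_cases hp : countedB l i <;> simp [hp]

lemma step_eq (l : List Char) (i : Nat) (hi : i < l.length) (v : Int) :
    (if l[i] ∈ (['a','e','i','o','u'] : List Char) then
        let v1 := v + 1
        if 0 < i then
          let v2 := if l.getD (i-1) ' ' == 'q' && l[i] == 'u' then v1 - 1 else v1
          let v3 := if l.getD (i-1) ' ' == 'g' && l[i] == 'u' then v2 - 1 else v2
          v3
        else v1
      else v) = v + (if countedB l i then 1 else 0) := by
  have hc : l.getD i ' ' = l[i] := List.getD_eq_getElem l ' ' hi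
  simp only [countedB, hc, List.getD_eq_getElem?_getD]
  by_cases hv : l[i] ∈ (['a','e','i','o','u'] : List Char)
  · by_cases hu : l[i] = 'u'
    · by_cases hi0 : 0 < i
      · by_cases hq : l[i-1]?.getD ' ' = 'q'
        · simp [hu, hi0, hq]
        · by_cases hg : l[i-1]?.getD ' ' = 'g' <;> simp [hu, hi0, hq, hg]
      · simp [hu, hi0]
    · by_cases hi0 : 0 < i <;> simp [hv, hu, hi0]
  · simp [hv]

lemma stop_ge (l : List Char) (i : Nat) (hi : i ≤ l.length) (hc : cntB l i ≤ 1) :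
    i ≤ stopIdx l := by
  unfold stopIdx
  split
  · rename_i h
    refine Nat.le_of_not_lt fun hlt => ?_
    have hsplit : (List.range l.length).filter (countedB l) =
        (List.range i).filter (countedB l) ++
          ((List.range (l.length - i)).map (i + ·)).filter (countedB l) := by
      conv_lhs => rw [show l.length = i + (l.length - i) by omega, List.range_add]
      rw [List.filter_append]
    have hc' : ((List.range i).filter (countedB l)).length ≤ 1 := hc
    have h2 : ((List.range l.length).filter (countedB l))[1]'h ∈
        ((List.range (l.length - i)).map (i + ·)).filter (countedB l) := by
      rw [List.getElem_of_eq hsplit]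
      rw [List.getElem_append_right (by omega)]
      exact List.getElem_mem _
    have hmem := (List.mem_filter.mp h2).1
    obtain ⟨j, _, hj⟩ := List.mem_map.mp hmem
    omega
  · omega

lemma stop_eq (l : List Char) (i : Nat) (hi : i < l.length) (hc : cntB l i = 1)
    (hp : countedB l i = true) : stopIdx l = i := by
  have hsplit : (List.range l.length).filter (countedB l) =
      (((List.range i).filter (countedB l)) ++ [i]) ++
        ((List.range (l.length - (i+1))).map ((i+1) + ·)).filter (countedB l) := by
    conv_lhs => rw [show l.length = (i+1) + (l.length - (i+1)) by omega, List.range_add]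
    rw [List.filter_append, List.range_succ, List.filter_append]
    simp [hp]
  have hc' : ((List.range i).filter (countedB l)).length = 1 := hc
  have hFlen : 1 < ((List.range l.length).filter (countedB l)).length := by
    rw [hsplit]; simp [hc']
  unfold stopIdx
  rw [dif_pos hFlen]
  rw [List.getElem_of_eq hsplit]
  rw [List.getElem_append_left (by simp [hc'])]
  rw [List.getElem_append_right (by omega)]
  simp

lemma loop_eq (l : List Char) : ∀ (k i : Nat) (new : List Char),
    l.length - i ≤ k → i ≤ l.length → cntB l i ≤ 1 →
    loopA l i (cntB l i) new = new ++ (l.take (stopIdx l)).drop i := by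
  intro k
  induction k with
  | zero =>
    intro i new hk hi hc
    have hieq : i = l.length := by omega
    rw [loopA]
    rw [dif_neg (by omega)]
    rw [List.drop_eq_nil_of_le (by simp only [List.length_take]; omega), List.append_nil]
  | succ k ih =>
    intro i new hk hi hc
    rw [loopA]
    by_cases hlt : i < l.length
    · rw [dif_pos hlt]
      simp only
      rw [step_eq l i hlt]
      have hcs := cnt_succ l i
      by_cases hp : countedB l i = true
      · rw [if_pos hp] at hcs ⊢
        by_cases h0 : cntB l i = 0
        · have hv2 : ((cntB l i : Int) + 1 < 2) := by omega
          rw [if_pos hv2]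
          have : (cntB l i : Int) + 1 = (cntB l (i+1) : Int) := by rw [hcs]; push_cast; ring
          rw [this]
          rw [ih (i+1) (new ++ [l[i]]) (by omega) (by omega) (by omega)]
          have hstop : i + 1 ≤ stopIdx l := stop_ge l (i+1) (by omega) (by omega)
          have hilen : i < (l.take (stopIdx l)).length := by
            simp only [List.length_take]; omega
          rw [List.drop_eq_getElem_cons hilen, List.getElem_take]
          simp
        · have h1 : cntB l i = 1 := by omega
          rw [if_neg (by omega)]
          rw [stop_eq l i hlt h1 hp]
          rw [List.drop_eq_nil_of_le (by simp only [List.length_take]; omega), List.append_nil]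
      · rw [if_neg hp] at hcs ⊢
        rw [if_pos (by omega)]
        have : (cntB l i : Int) + 0 = (cntB l (i+1) : Int) := by rw [hcs]; push_cast; ring
        rw [this]
        rw [ih (i+1) (new ++ [l[i]]) (by omega) (by omega) (by omega)]
        have hstop : i + 1 ≤ stopIdx l := stop_ge l (i+1) (by omega) (by omega)
        have hilen : i < (l.take (stopIdx l)).length := by simp only [List.length_take]; omega
        rw [List.drop_eq_getElem_cons hilen, List.getElem_take]
        simp
    · rw [dif_neg hlt]
      have hieq : i = l.length := by omega
      rw [List.drop_eq_nil_of_le (by simp only [List.length_take]; omega), List.append_nil]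

lemma main_eq (cadena : String) :
    extraerPrimeraSilaba cadena = extraerPrimeraSilaba_alt cadena := by
  unfold extraerPrimeraSilaba extraerPrimeraSilaba_alt
  set l := cadena.toList with hl
  have h0 : (0 : Int) = (cntB l 0 : Int) := by simp [cntB]
  rw [h0, loop_eq l l.length 0 [] (by omega) (by omega) (by simp [cntB]),
    List.drop_zero, List.nil_append]
  unfold stopIdx
  dsimp only
  split
  · rfl
  · rw [List.take_of_length_le (le_refl _), hl, String.ofList_toList]

-- ===== VERDICT (by name: the statement is the Claim_ definition above) =====
theorem extraerPrimeraSilaba_spec : Claim_equal_extraerPrimeraSilaba := by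
  intro cadena _
  unfold Spec_extraerPrimeraSilaba
  exact main_eq cadena
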